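-- pv_equiv track=rewrite | github.com/Buildbetbigger/dfs-meta-optimizer- | modules/lineup_filter.py | find_most_unique_lineups
-- ===== SOURCE A (Python) =====
-- from typing import List, Dict, Optional, Set, Tuple
--
-- def find_most_unique_lineups(
--
--     lineups: List[Dict],
--     n: int = 10
-- ) -> List[Dict]:
--     """
--     Find N most unique lineups in portfolio.
--
--     Args:
--         lineups: List of lineup dictionaries
--         n: Number of unique lineups to return
--
--     Returns:
--         List of most unique lineups
--     """
--     if len(lineups) <= n:
--         return lineups
--
--     # Calculate uniqueness score for each lineup
--     uniqueness_scores = []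
--
--     for i, candidate in enumerate(lineups):
--         candidate_players = set(candidate['players'])
--
--         # Sum of differences from all other lineups
--         total_uniqueness = 0
--
--         for j, other in enumerate(lineups):
--             if i == j:
--                 continue
--
--             other_players = set(other['players'])
--             unique_count = len(candidate_players ^ other_players)
--             total_uniqueness += unique_count
--
--         avg_uniqueness = total_uniqueness / (len(lineups) - 1)
--         uniqueness_scores.append((i, avg_uniqueness))
--
--     # Sort by uniqueness
--     uniqueness_scores.sort(key=lambda x: x[1], reverse=True)
--
--     # Return top N
--     top_indices = [idx for idx, _ in uniqueness_scores[:n]]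
--
--     return [lineups[idx] for idx in top_indices]
-- ===== SOURCE B (Python) =====
-- def find_most_unique_lineups(lineups, n=10):
--     if len(lineups) <= n:
--         return lineups
--     L = len(lineups)
--     sets = [set(l['players']) for l in lineups]
--     # player frequency across all lineups (as sets)
--     freq = {}
--     for s in sets:
--         for p in s:
--             freq[p] = freq.get(p, 0) + 1
--     T = sum(len(s) for s in sets)
--     # sum_j |S_i ^ S_j| = L*|S_i| + T - 2*sum_{p in S_i} freq[p]
--     scores = []
--     for i, s in enumerate(sets):
--         total = L * len(s) + T - 2 * sum(freq[p] for p in s)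
--         scores.append((i, total / (L - 1)))
--     scores.sort(key=lambda x: x[1], reverse=True)
--     return [lineups[i] for i, _ in scores[:n]]
-- ===== Notes on version B (the rewrite author's own statement) =====
-- stated objective: alternative
-- what changed: Replaces the all-pairs symmetric-difference double loop by a one-pass player-frequency counter and the identity sum_j |Si ^ Sj| = L*|Si| + sum_j |Sj| - 2*sum_{p in Si} freq(p), computing each lineup's score from the counter.
import Mathlib
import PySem

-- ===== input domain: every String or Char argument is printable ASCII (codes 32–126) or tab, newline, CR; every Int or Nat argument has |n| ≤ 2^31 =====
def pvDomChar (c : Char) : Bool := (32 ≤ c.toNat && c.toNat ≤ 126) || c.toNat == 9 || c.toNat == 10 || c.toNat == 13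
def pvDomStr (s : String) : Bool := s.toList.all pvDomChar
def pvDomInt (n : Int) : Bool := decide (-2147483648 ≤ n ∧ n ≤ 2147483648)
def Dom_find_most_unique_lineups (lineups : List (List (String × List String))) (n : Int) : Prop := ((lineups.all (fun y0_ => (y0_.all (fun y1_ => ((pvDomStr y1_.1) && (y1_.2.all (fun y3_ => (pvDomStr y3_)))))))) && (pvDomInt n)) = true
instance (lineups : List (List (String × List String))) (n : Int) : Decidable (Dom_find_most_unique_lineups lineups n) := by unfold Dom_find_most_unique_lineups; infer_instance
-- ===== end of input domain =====

-- B replaces A's all-pairs symmetric-difference double loop by a one-pass player-frequency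
-- counter and the identity sum_j |Si △ Sj| = L·|Si| + Σ|Sj| - 2·Σ_{p∈Si} freq(p).
-- Python's float division '/ (len-1)' is ported as exact Rat division (it is only a sort key).

-- ===== PORT A =====
def find_most_unique_lineups (lineups : List (List (String × List String))) (n : Int) : List (List (String × List String)) :=
  if (lineups.length : Int) ≤ n then lineups
  else
    -- uniqueness_scores loop: for each (i, candidate), sum |cand △ other| over j ≠ i
    let scores : List (Int × Rat) :=
      (PySem.List.enumerate lineups).foldl (fun acc ic =>
        acc ++ [(ic.1,
          (((PySem.List.enumerate lineups).foldl (fun t jo =>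
              if ic.1 == jo.1 then t
              else t + PySem.Set.len (PySem.Set.symmDiff
                     (PySem.Set.ofList ((List.lookup "players" ic.2).getD []))
                     (PySem.Set.ofList ((List.lookup "players" jo.2).getD [])))) 0 : Int) : Rat)
            / ((lineups.length : Rat) - 1))]) []
    let sortedScores := PySem.List.sorted scores (fun x => x.2) true
    let topIndices := (PySem.List.slice sortedScores none (some n)).map (fun x => x.1)
    topIndices.map (fun idx => PySem.List.pyGetD lineups idx [])

-- ===== PORT B =====
def find_most_unique_lineups_alt (lineups : List (List (String × List String))) (n : Int) : List (List (String × List String)) :=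
  if (lineups.length : Int) ≤ n then lineups
  else
    let L : Int := lineups.length
    let sets : List (PySem.Set String) :=
      lineups.map (fun l => PySem.Set.ofList ((List.lookup "players" l).getD []))
    -- freq[p] = number of lineups whose player set contains p
    let freq : PySem.Dict String Int :=
      sets.foldl (fun d s => s.foldl (fun d p => PySem.Dict.modify d p 0 (· + 1)) d) PySem.Dict.empty
    let T : Int := sets.foldl (fun t s => t + PySem.Set.len s) 0
    let scores : List (Int × Rat) :=
      (PySem.List.enumerate sets).foldl (fun acc is =>
        acc ++ [(is.1,
          ((L * PySem.Set.len is.2 + T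
             - 2 * (is.2.foldl (fun t p => t + PySem.Dict.getD freq p 0) 0) : Int) : Rat)
            / ((L : Rat) - 1))]) []
    let sortedScores := PySem.List.sorted scores (fun x => x.2) true
    (PySem.List.slice sortedScores none (some n)).map (fun x => PySem.List.pyGetD lineups x.1 [])

-- ===== PRECONDITION & SPEC =====
-- Pre_ excludes exactly the inputs where the Python A raises: a lineup dict without the
-- 'players' key (KeyError) or a single-lineup portfolio with n < 1 (ZeroDivisionError in
-- total/(len-1)); when len(lineups) <= n neither is reached and A returns.
def Pre_find_most_unique_lineups (lineups : List (List (String × List String))) (n : Int) : Prop :=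
  (lineups.length : Int) ≤ n ∨
    (lineups.length ≠ 1 ∧ ∀ l ∈ lineups, (List.lookup "players" l).isSome = true)
instance (lineups : List (List (String × List String))) (n : Int) : Decidable (Pre_find_most_unique_lineups lineups n) := by unfold Pre_find_most_unique_lineups; infer_instance

def pvWitness_find_most_unique_lineups : (List (List (String × List String))) × Int :=
  ([[("players", ["a", "b"])], [("players", ["b", "c"])]], 1)

def Spec_find_most_unique_lineups (lineups : List (List (String × List String))) (n : Int) (out : List (List (String × List String))) : Prop := out = find_most_unique_lineups_alt lineups n
instance (lineups : List (List (String × List String))) (n : Int) (out : List (List (String × List String))) : Decidable (Spec_find_most_unique_lineups lineups n out) := by unfold Spec_find_most_unique_lineups; infer_instance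

-- ===== CLAIM (what is proved, stated in full; the proofs are below) =====
def Claim_equal_find_most_unique_lineups : Prop := ∀ (lineups : List (List (String × List String))) (n : Int), Dom_find_most_unique_lineups lineups n → Pre_find_most_unique_lineups lineups n → Spec_find_most_unique_lineups lineups n (find_most_unique_lineups lineups n)

-- ===== LEMMAS AND PROOFS =====


theorem pv_sum_count (c s : List String) (hs : s.Nodup) :
    (c.map (fun p => (s.count p : Int))).sum = ((c.filter (fun p => s.contains p)).length : Int) := by
  induction c with
  | nil => simp
  | cons x c ih =>
    simp only [List.map_cons, List.sum_cons, List.filter_cons]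
    by_cases hx : x ∈ s
    · rw [List.count_eq_one_of_mem hs hx, ih]
      simp [hx]
      omega
    · rw [List.count_eq_zero_of_not_mem hx, ih]
      simp [hx]

theorem pv_inter_comm (c s : List String) (hc : c.Nodup) (hs : s.Nodup) :
    (s.filter (fun x => c.contains x)).length = (c.filter (fun x => s.contains x)).length := by
  rw [← List.toFinset_card_of_nodup (hs.filter _), ← List.toFinset_card_of_nodup (hc.filter _),
    List.toFinset_filter, List.toFinset_filter]
  simp only [List.contains_eq_mem, ← List.mem_toFinset, decide_eq_true_eq]
  rw [Finset.filter_mem_eq_inter, Finset.filter_mem_eq_inter, Finset.inter_comm]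

theorem pv_symm_card (c s : List String) (hc : c.Nodup) (hs : s.Nodup) :
    PySem.Set.len (PySem.Set.symmDiff c s)
      = (c.length : Int) + (s.length : Int) - 2 * (c.map (fun p => (s.count p : Int))).sum := by
  simp only [PySem.Set.len, PySem.Set.symmDiff, PySem.Set.diff, List.length_append]
  rw [pv_sum_count c s hs]
  have h1 := List.length_eq_length_filter_add (l := c) (fun x => s.contains x)
  have h2 := List.length_eq_length_filter_add (l := s) (fun x => c.contains x)
  have h3 := pv_inter_comm c s hc hs
  simp only [PySem.Set.contains] at *
  push_cast
  omega

theorem pv_symm_self (c : List String) : PySem.Set.len (PySem.Set.symmDiff c c) = 0 := by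
  simp only [PySem.Set.len, PySem.Set.symmDiff, PySem.Set.diff, List.length_append]
  have : c.filter (fun x => !PySem.Set.contains c x) = [] := by
    rw [List.filter_eq_nil_iff]
    intro a ha
    simp [PySem.Set.contains, ha]
  simp only [this, List.length_nil, Nat.add_zero, Nat.cast_eq_zero]


theorem pv_total (c : List String) (sets : List (List String)) (hc : c.Nodup)
    (hs : ∀ s ∈ sets, s.Nodup) :
    (sets.map (fun s => PySem.Set.len (PySem.Set.symmDiff c s))).sum
      = (sets.length : Int) * (c.length : Int) + (sets.map (fun s => (s.length : Int))).sum
        - 2 * (c.map (fun p => (sets.flatten.count p : Int))).sum := by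
  induction sets with
  | nil => simp
  | cons s ss ih =>
    have hcount : (c.map (fun p => ((s ++ ss.flatten).count p : Int))).sum
        = (c.map (fun p => (s.count p : Int))).sum + (c.map (fun p => (ss.flatten.count p : Int))).sum := by
      rw [← List.sum_map_add]
      apply congrArg
      apply List.map_congr_left
      intro p _
      push_cast [List.count_append]
      ring
    simp only [List.map_cons, List.sum_cons, List.flatten_cons, List.length_cons, hcount,
      ih (fun t ht => hs t (List.mem_cons_of_mem _ ht)),
      pv_symm_card c s hc (hs s (List.mem_cons_self ..))]
    push_cast
    ring

theorem pv_sum_enum_lt {α : Type} (g : α → Int) (xs : List α) (s i : Int) (h : i < s) :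
    ((PySem.List.enumerate xs s).map (fun jo => if i == jo.1 then 0 else g jo.2)).sum
      = (xs.map g).sum := by
  induction xs generalizing s with
  | nil => simp [PySem.List.enumerate]
  | cons x t ih =>
    rw [PySem.List.enumerate_cons]
    simp only [List.map_cons, List.sum_cons]
    have hne : (i == s) = false := by simp; omega
    rw [hne, ih (s + 1) (by omega)]
    simp

theorem pv_sum_enum_skip {α : Type} (g : α → Int) (xs : List α) (s : Int) (k : Nat)
    (h : k < xs.length) :
    ((PySem.List.enumerate xs s).map (fun jo => if (s + (k : Int)) == jo.1 then 0 else g jo.2)).sum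
      = (xs.map g).sum - g (xs[k]'h) := by
  induction xs generalizing s k with
  | nil => simp at h
  | cons x t ih =>
    rw [PySem.List.enumerate_cons]
    simp only [List.map_cons, List.sum_cons]
    cases k with
    | zero =>
      have he : ((s + ((0 : Nat) : Int)) == s) = true := by simp
      rw [if_pos he]
      have := pv_sum_enum_lt g t (s + 1) (s + ((0 : Nat) : Int)) (by push_cast; omega)
      rw [this]
      simp only [List.getElem_cons_zero]
      ring
    | succ m =>
      have hne : ((s + ((m + 1 : Nat) : Int)) == s) = false := by simp; omega
      rw [if_neg (by simp; omega)]
      have harg : ∀ jo : Int × α, ((s + ((m + 1 : Nat) : Int)) == jo.1) = (((s + 1) + (m : Nat)) == jo.1) := by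
        intro jo; congr 1; push_cast; ring
      calc g x + ((PySem.List.enumerate t (s + 1)).map
              (fun jo => if (s + ((m + 1 : Nat) : Int)) == jo.1 then 0 else g jo.2)).sum
          = g x + ((PySem.List.enumerate t (s + 1)).map
              (fun jo => if ((s + 1) + ((m : Nat) : Int)) == jo.1 then 0 else g jo.2)).sum := by
            congr 1
            apply congrArg List.sum
            apply List.map_congr_left
            intro jo _
            rw [harg jo]
        _ = g x + ((t.map g).sum - g (t[m]'(by simpa using h))) := by
            rw [ih (s + 1) m (by simpa using h)]
        _ = ((x :: t).map g).sum - g ((x :: t)[m + 1]'h) := by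
            simp only [List.map_cons, List.sum_cons, List.getElem_cons_succ]
            ring

theorem pv_totalA {α : Type} (g : α → Int) (xs : List α) (i : Nat) (h : i < xs.length)
    (hg : g (xs[i]'h) = 0) :
    List.foldl (fun t jo => if ((0 + (i : Int)) == jo.1) = true then t else t + g jo.2) 0
        (PySem.List.enumerate xs)
      = (xs.map g).sum := by
  rw [PySem.List.foldl_congr_mem _ _ (fun t jo => t + (if ((0 + (i : Int)) == jo.1) = true then 0 else g jo.2)) 0
    (by intro acc x _; dsimp only; split <;> ring)]
  rw [PySem.List.foldl_add, pv_sum_enum_skip g xs 0 i h, hg]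
  ring

theorem pv_freq (sets : List (List String)) (p : String) :
    (List.foldl (fun d s => List.foldl (fun d p => PySem.Dict.modify d p 0 (fun x => x + 1)) d s)
        PySem.Dict.empty sets).getD p 0 = (sets.flatten.count p : Int) := by
  rw [← List.foldl_flatten, PySem.Dict.getD_foldl_modify_add_one, PySem.Dict.getD_empty]
  ring

theorem pv_totalL (c : List String) (lineups : List (List (String × List String))) (hc : c.Nodup) :
    (lineups.map (fun l => PySem.Set.len (PySem.Set.symmDiff c (PySem.Set.ofList ((List.lookup "players" l).getD []))))).sum
      = ((lineups.map (fun l => PySem.Set.ofList ((List.lookup "players" l).getD []))).length : Int) * (c.length : Int)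
        + ((lineups.map (fun l => PySem.Set.ofList ((List.lookup "players" l).getD []))).map (fun s => (s.length : Int))).sum
        - 2 * (c.map (fun p => (((lineups.map (fun l => PySem.Set.ofList ((List.lookup "players" l).getD []))).flatten.count p : Int)))).sum := by
  have h := pv_total c (lineups.map (fun l => PySem.Set.ofList ((List.lookup "players" l).getD []))) hc
    (by intro s hs
        obtain ⟨l, -, rfl⟩ := List.mem_map.mp hs
        exact PySem.Set.nodup_ofList _)
  rw [List.map_map] at h
  exact h

-- ===== VERDICT (by name: the statement is the Claim_ definition above) =====
theorem find_most_unique_lineups_spec : Claim_equal_find_most_unique_lineups := by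
  intro lineups n _ _
  unfold Spec_find_most_unique_lineups find_most_unique_lineups find_most_unique_lineups_alt
  by_cases hle : (lineups.length : Int) ≤ n
  · simp [hle]
  · simp only [if_neg hle]
    rw [List.map_map]
    have hfun : ((fun idx => PySem.List.pyGetD lineups idx []) ∘ (fun x : Int × Rat => x.1))
        = (fun x : Int × Rat => PySem.List.pyGetD lineups x.1 []) := rfl
    rw [hfun]
    congr 2
    congr 1
    rw [PySem.List.foldl_append_singleton_eq_map, PySem.List.foldl_append_singleton_eq_map]
    simp only [List.nil_append]
    apply List.ext_getElem
    · simp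
    intro k hk1 hk2
    have hk : k < lineups.length := by simpa using hk1
    simp only [List.getElem_map]
    rw [PySem.List.getElem_enumerate, PySem.List.getElem_enumerate]
    simp only [List.getElem_map]
    congr 1
    rw [pv_totalA (fun l => ((PySem.Set.ofList ((List.lookup "players" lineups[k]).getD [])).symmDiff (PySem.Set.ofList ((List.lookup "players" l).getD []))).len) lineups k hk (pv_symm_self _)]
    rw [pv_totalL _ lineups (PySem.Set.nodup_ofList _)]
    simp only [PySem.List.foldl_add, pv_freq]
    simp only [PySem.Set.len, List.length_map,
      show (PySem.Set.len : PySem.Set String → Int) = fun s => ((List.length s : Int)) from rfl]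
    push_cast
    ring
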